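-- pv_equiv track=rewrite | github.com/zhoumengbo/algorithm_lesson | third_test/test_3-8.py | solution
-- ===== SOURCE A (Python) =====
-- import collections
--
-- def solution(input_l, number):
--     res = 0
--     x_l = []
--     y_l = []
--     for p in range(number):
--         x_l.append(input_l[p][0])
--         y_l.append(input_l[p][1])
--     # 统计横、纵坐标的值和出现的次数
--     x = collections.Counter(x_l)
--     y = collections.Counter(y_l)
--     for m in x:
--         res += (x[m] * (x[m] - 1)) // 2
--     for n in y:
--         res += (y[n] * (y[n] - 1)) // 2
--     return res
-- ===== SOURCE B (Python) =====
-- def solution(input_l, number):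
--     # One incremental pass: count pairs as later points meet earlier ones.
--     res = 0
--     seen_x = {}
--     seen_y = {}
--     for p in range(number):
--         x, y = input_l[p]
--         res += seen_x.get(x, 0) + seen_y.get(y, 0)
--         seen_x[x] = seen_x.get(x, 0) + 1
--         seen_y[y] = seen_y.get(y, 0) + 1
--     return res
-- ===== Notes on version B (the rewrite author's own statement) =====
-- stated objective: alternative
-- what changed: Replaced the two-phase count (build x/y lists, take two Counters, then sum n*(n-1)//2 over each Counter's keys) by a single incremental pass that keeps running per-coordinate counts in two dicts and adds the number of earlier matching points at each step; no binomial formula anywhere.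
import Mathlib
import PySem

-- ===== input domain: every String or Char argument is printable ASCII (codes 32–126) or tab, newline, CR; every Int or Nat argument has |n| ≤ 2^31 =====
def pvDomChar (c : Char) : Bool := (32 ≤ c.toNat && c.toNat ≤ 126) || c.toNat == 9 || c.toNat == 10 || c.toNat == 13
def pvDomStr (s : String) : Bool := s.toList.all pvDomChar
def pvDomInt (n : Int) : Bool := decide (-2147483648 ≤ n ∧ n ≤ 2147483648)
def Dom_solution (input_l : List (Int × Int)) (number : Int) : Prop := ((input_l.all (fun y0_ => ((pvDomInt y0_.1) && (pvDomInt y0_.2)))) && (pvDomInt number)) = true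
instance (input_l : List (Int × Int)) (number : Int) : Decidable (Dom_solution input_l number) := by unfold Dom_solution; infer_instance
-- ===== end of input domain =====

-- B replaces A's two Counters + binomial sums by a single incremental pass over the
-- points with two running count dicts (alternative decomposition, same O(n) cost).


-- ===== PORT A =====
-- literal port of A: build x_l / y_l by indexing, take two Counters, then sum c*(c-1)//2
-- over each Counter's keys.  On p out of range Python raises IndexError (excluded by Pre_);
-- there the port reads a default (0,0).
def solution (input_l : List (Int × Int)) (number : Int) : Int :=
  let lists := (PySem.List.pyRange 0 number).foldl
      (fun (st : List Int × List Int) p =>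
        (st.1 ++ [(PySem.List.pyGetD input_l p (0, 0)).1],
         st.2 ++ [(PySem.List.pyGetD input_l p (0, 0)).2]))
      ([], [])
  let x := PySem.Dict.counter lists.1
  let y := PySem.Dict.counter lists.2
  let res := x.keys.foldl
      (fun res m => res + PySem.Int.floordiv (x.getD m 0 * (x.getD m 0 - 1)) 2) 0
  y.keys.foldl
      (fun res n => res + PySem.Int.floordiv (y.getD n 0 * (y.getD n 0 - 1)) 2) res

-- ===== PORT B =====
-- literal port of Source B: one pass, state (res, seen_x, seen_y)
def solution_alt (input_l : List (Int × Int)) (number : Int) : Int :=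
  ((PySem.List.pyRange 0 number).foldl
      (fun (st : Int × PySem.Dict Int Int × PySem.Dict Int Int) p =>
        let pt := PySem.List.pyGetD input_l p (0, 0)
        (st.1 + st.2.1.getD pt.1 0 + st.2.2.getD pt.2 0,
         st.2.1.insert pt.1 (st.2.1.getD pt.1 0 + 1),
         st.2.2.insert pt.2 (st.2.2.getD pt.2 0 + 1)))
      (0, PySem.Dict.empty, PySem.Dict.empty)).1

-- ===== PRECONDITION & SPEC =====
-- Pre_ excludes only number > len(input_l), where A (and B) raise IndexError.
def Pre_solution (input_l : List (Int × Int)) (number : Int) : Prop :=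
  number ≤ PySem.List.len input_l
instance (input_l : List (Int × Int)) (number : Int) : Decidable (Pre_solution input_l number) := by unfold Pre_solution; infer_instance

def pvWitness_solution : (List (Int × Int)) × Int := ([(1, 2), (1, 3), (4, 3), (1, 2)], 4)

def Spec_solution (input_l : List (Int × Int)) (number : Int) (out : Int) : Prop := out = solution_alt input_l number
instance (input_l : List (Int × Int)) (number : Int) (out : Int) : Decidable (Spec_solution input_l number out) := by unfold Spec_solution; infer_instance

-- ===== CLAIM (what is proved, stated in full; the proofs are below) =====
def Claim_equal_solution : Prop := ∀ (input_l : List (Int × Int)) (number : Int), Dom_solution input_l number → Pre_solution input_l number → Spec_solution input_l number (solution input_l number)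

-- ===== LEMMAS AND PROOFS =====

-- the per-key binomial summand of A, and its sum over the distinct values of l
def pvTerm (l : List Int) (m : Int) : Int :=
  PySem.Int.floordiv ((l.count m : Int) * ((l.count m : Int) - 1)) 2

def pvCsum (l : List Int) : Int := ((PySem.Set.ofList l).map (pvTerm l)).sum

theorem pvFloordiv_succ (c : Int) :
    PySem.Int.floordiv ((c + 1) * c) 2 = PySem.Int.floordiv (c * (c - 1)) 2 + c := by
  rw [PySem.Int.floordiv_eq_ediv_of_pos (by norm_num),
      PySem.Int.floordiv_eq_ediv_of_pos (by norm_num)]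
  have h : (c + 1) * c = c * (c - 1) + c * 2 := by ring
  rw [h, Int.add_mul_ediv_right _ _ (by norm_num : (2:Int) ≠ 0)]

-- replacing f by f' (agreeing off a, a occurring once in the nodup list S) shifts the sum by f' a - f a
theorem pvSum_map_update (S : List Int) (a : Int) (f f' : Int → Int) :
    S.Nodup → a ∈ S → (∀ m ∈ S, m ≠ a → f' m = f m) →
    (S.map f').sum = (S.map f).sum + (f' a - f a) := by
  induction S with
  | nil => intro _ ha; cases ha
  | cons x S ih =>
    intro hnd ha heq
    rcases List.mem_cons.mp ha with rfl | haS
    · have : S.map f' = S.map f := by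
        apply List.map_congr_left
        intro m hm
        exact heq m (List.mem_cons_of_mem _ hm) (fun h => (List.nodup_cons.mp hnd).1 (h ▸ hm))
      simp [this]; ring
    · have hxa : x ≠ a := fun h => (List.nodup_cons.mp hnd).1 (h ▸ haS)
      have := ih (List.nodup_cons.mp hnd).2 haS
        (fun m hm hma => heq m (List.mem_cons_of_mem _ hm) hma)
      simp [this, heq x (List.mem_cons_self) hxa]; ring

theorem pvCount_append_ne (l : List Int) (a m : Int) (h : m ≠ a) :
    (l ++ [a]).count m = l.count m := by
  simp [List.count_append, List.count_singleton]
  omega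

theorem pvCsum_append_singleton (l : List Int) (a : Int) :
    pvCsum (l ++ [a]) = pvCsum l + (l.count a : Int) := by
  have hofl : PySem.Set.ofList (l ++ [a]) = PySem.Set.add (PySem.Set.ofList l) a := by
    simp [PySem.Set.ofList_eq_foldl, List.foldl_append]
  have hterm : ∀ m ∈ PySem.Set.ofList l, m ≠ a → pvTerm (l ++ [a]) m = pvTerm l m := by
    intro m _ hma
    simp [pvTerm, pvCount_append_ne l a m hma]
  have hca : ((l ++ [a]).count a : Int) = (l.count a : Int) + 1 := by
    simp [List.count_append]
  by_cases hmem : a ∈ l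
  · have hadd : PySem.Set.add (PySem.Set.ofList l) a = PySem.Set.ofList l := by
      simp [PySem.Set.add, PySem.Set.contains, (PySem.Set.mem_ofList l a).mpr hmem]
    have hupd := pvSum_map_update (PySem.Set.ofList l) a (pvTerm l) (pvTerm (l ++ [a]))
      (PySem.Set.nodup_ofList l) ((PySem.Set.mem_ofList l a).mpr hmem) hterm
    have hdiff : pvTerm (l ++ [a]) a - pvTerm l a = (l.count a : Int) := by
      simp only [pvTerm, hca]
      have h1 : ((l.count a : Int) + 1) * ((l.count a : Int) + 1 - 1)
          = ((l.count a : Int) + 1) * (l.count a : Int) := by ring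
      rw [h1, pvFloordiv_succ]
      ring
    simp only [pvCsum, hofl, hadd, hupd, hdiff]
  · have hadd : PySem.Set.add (PySem.Set.ofList l) a = PySem.Set.ofList l ++ [a] := by
      simp [PySem.Set.add, PySem.Set.contains, PySem.Set.mem_ofList]
      exact hmem
    have hmap : (PySem.Set.ofList l).map (pvTerm (l ++ [a])) = (PySem.Set.ofList l).map (pvTerm l) := by
      apply List.map_congr_left
      intro m hm
      exact hterm m hm (fun h => hmem (h ▸ ((PySem.Set.mem_ofList l m).mp hm)))
    have hcnt0 : l.count a = 0 := List.count_eq_zero.mpr hmem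
    have hta : pvTerm (l ++ [a]) a = 0 := by
      simp [pvTerm, hcnt0]
    simp [pvCsum, hofl, hadd, hmap, hta, hcnt0]

-- B's one-pass loop, as a fold over the point list itself
def pvStep (st : Int × PySem.Dict Int Int × PySem.Dict Int Int) (pt : Int × Int) :
    Int × PySem.Dict Int Int × PySem.Dict Int Int :=
  (st.1 + st.2.1.getD pt.1 0 + st.2.2.getD pt.2 0,
   st.2.1.insert pt.1 (st.2.1.getD pt.1 0 + 1),
   st.2.2.insert pt.2 (st.2.2.getD pt.2 0 + 1))

theorem pvCounter_insert (xs : List Int) (a : Int) :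
    (PySem.Dict.counter xs).insert a ((xs.count a : Int) + 1)
      = PySem.Dict.counter (xs ++ [a]) := by
  rw [PySem.Dict.counter_append_singleton, ← PySem.Dict.getD_counter xs a]
  exact PySem.Dict.ext_iff.mpr rfl

-- loop invariant of B's pass
theorem pvB_inv (pts : List (Int × Int)) :
    ∀ (r : Int) (xs ys : List Int),
    (pts.foldl pvStep (r, PySem.Dict.counter xs, PySem.Dict.counter ys)).1
      = r + pvCsum (xs ++ pts.map Prod.fst) + pvCsum (ys ++ pts.map Prod.snd)
          - pvCsum xs - pvCsum ys := by
  induction pts with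
  | nil =>
    intro r xs ys
    simp only [List.foldl_nil, List.map_nil, List.append_nil]
    ring
  | cons pt pts ih =>
    intro r xs ys
    have hstep : pvStep (r, PySem.Dict.counter xs, PySem.Dict.counter ys) pt
        = (r + (xs.count pt.1 : Int) + (ys.count pt.2 : Int),
           PySem.Dict.counter (xs ++ [pt.1]), PySem.Dict.counter (ys ++ [pt.2])) := by
      simp [pvStep, PySem.Dict.getD_counter, pvCounter_insert]
    have h1 : xs ++ pt.1 :: pts.map Prod.fst = (xs ++ [pt.1]) ++ pts.map Prod.fst := by simp
    have h2 : ys ++ pt.2 :: pts.map Prod.snd = (ys ++ [pt.2]) ++ pts.map Prod.snd := by simp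
    simp only [List.foldl_cons, hstep, ih, List.map_cons, h1, h2,
      pvCsum_append_singleton]
    omega

-- under Pre_, the indexing loop reads exactly the first number points
theorem pvRange_map (input_l : List (Int × Int)) (number : Int)
    (h : number ≤ PySem.List.len input_l) :
    (PySem.List.pyRange 0 number).map (fun j => PySem.List.pyGetD input_l j (0, 0))
      = input_l.take number.toNat := by
  by_cases hn : 0 ≤ number
  · have hlen : PySem.List.len (input_l.take number.toNat) = number := by
      simp only [PySem.List.len] at h ⊢
      simp [List.length_take]
      omega
    calc (PySem.List.pyRange 0 number).map (fun j => PySem.List.pyGetD input_l j (0, 0))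
        = (PySem.List.pyRange 0 number).map
            (fun j => PySem.List.pyGetD (input_l.take number.toNat) j (0, 0)) := by
          apply List.map_congr_left
          intro j hj
          have hj' := PySem.List.mem_pyRange_one.mp hj
          have hjl : j < (input_l.length : Int) := by
            simp only [PySem.List.len] at h; omega
          rw [PySem.List.pyGetD_eq_getElem _ _ hj'.1 hjl,
              PySem.List.pyGetD_eq_getElem _ _ hj'.1 (by simp [List.length_take]; omega)]
          rw [List.getElem_take]
      _ = input_l.take number.toNat := by
          have hmain := PySem.List.map_pyGetD_pyRange_zero (input_l.take number.toNat)
            ((0 : Int), (0 : Int))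
          rw [hlen] at hmain
          exact hmain
  · have hr : PySem.List.pyRange 0 number = [] := by
      simp [PySem.List.pyRange]; omega
    have ht : number.toNat = 0 := by omega
    simp [hr, ht]

-- A's per-axis key loop sums pvCsum
theorem pvA_axis (l : List Int) (init : Int) :
    (PySem.Dict.counter l).keys.foldl
      (fun res m => res + PySem.Int.floordiv ((PySem.Dict.counter l).getD m 0
          * ((PySem.Dict.counter l).getD m 0 - 1)) 2) init
      = init + pvCsum l := by
  rw [PySem.List.foldl_add]
  simp only [PySem.Dict.keys_counter, PySem.Dict.getD_counter, pvCsum]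
  rfl

-- ===== VERDICT (by name: the statement is the Claim_ definition above) =====
theorem solution_spec : Claim_equal_solution := by
  intro input_l number _ hpre
  unfold Spec_solution solution solution_alt
  set pts := input_l.take number.toNat with hpts
  -- A side: the list-building loop yields (pts.map fst, pts.map snd)
  rw [PySem.List.foldl_prod_mk
        (f := fun acc p => acc ++ [(PySem.List.pyGetD input_l p (0, 0)).1])
        (g := fun acc p => acc ++ [(PySem.List.pyGetD input_l p (0, 0)).2])]
  simp only [PySem.List.foldl_append_singleton_eq_map, List.nil_append]
  have hmapA : ∀ (f : (Int × Int) → Int),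
      (PySem.List.pyRange 0 number).map (fun p => f (PySem.List.pyGetD input_l p (0, 0)))
        = pts.map f := by
    intro f
    rw [show (fun p => f (PySem.List.pyGetD input_l p (0, 0)))
          = f ∘ (fun j => PySem.List.pyGetD input_l j (0, 0)) from rfl,
        ← List.map_map, pvRange_map input_l number hpre]
  rw [hmapA (fun q => q.1), hmapA (fun q => q.2)]
  rw [pvA_axis, pvA_axis]
  -- B side
  rw [show (fun (st : Int × PySem.Dict Int Int × PySem.Dict Int Int) p =>
        let pt := PySem.List.pyGetD input_l p (0, 0)
        (st.1 + st.2.1.getD pt.1 0 + st.2.2.getD pt.2 0,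
         st.2.1.insert pt.1 (st.2.1.getD pt.1 0 + 1),
         st.2.2.insert pt.2 (st.2.2.getD pt.2 0 + 1)))
      = (fun st p => pvStep st (PySem.List.pyGetD input_l p (0, 0))) from rfl,
     ← List.foldl_map, pvRange_map input_l number hpre]
  have hemp : (PySem.Dict.empty : PySem.Dict Int Int) = PySem.Dict.counter [] := rfl
  rw [hemp, pvB_inv pts 0 [] []]
  simp [pvCsum]
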